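-- pv_equiv track=rewrite | github.com/AMSC22-23/Lattice-Boltzmann-Method-Raffaelli-Torti-Cioci | scripts/airfoil_profile.py | replace_zeros_between_ones
-- ===== SOURCE A (Python) =====
-- def replace_zeros_between_ones(line):
--     found_first_one = False
--     modified_line = []
--
--     for char in line:
--         if char == '1':
--             found_first_one = True
--             modified_line.append(char)
--         elif found_first_one and char == '0':
--             modified_line.append('1')
--         else:
--             modified_line.append(char)
--
--     return ''.join(modified_line)
-- ===== SOURCE B (Python) =====
-- def replace_zeros_between_ones(line):
--     i = line.find('1')
--     if i == -1:
--         return line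
--     return line[:i] + line[i:].replace('0', '1')
-- ===== Notes on version B (the rewrite author's own statement) =====
-- stated objective: faster
-- what changed: Replaces A's per-character state machine building a list with find + slice + str.replace: locate the first one-character, keep the prefix, and bulk-replace zeros with ones in the suffix using C-level string primitives.
import Mathlib
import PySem

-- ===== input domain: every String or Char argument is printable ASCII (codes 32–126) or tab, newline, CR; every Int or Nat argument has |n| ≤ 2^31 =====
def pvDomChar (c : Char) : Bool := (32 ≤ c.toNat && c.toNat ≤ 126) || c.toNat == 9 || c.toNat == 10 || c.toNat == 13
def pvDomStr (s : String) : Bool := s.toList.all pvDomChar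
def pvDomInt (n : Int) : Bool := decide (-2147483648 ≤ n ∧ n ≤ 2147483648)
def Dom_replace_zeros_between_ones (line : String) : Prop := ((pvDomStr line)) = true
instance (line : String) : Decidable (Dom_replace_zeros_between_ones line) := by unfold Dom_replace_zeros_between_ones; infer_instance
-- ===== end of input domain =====

-- B replaces A's per-character state machine with find + slice + replace (simpler decomposition).


-- ===== PORT A =====
-- literal port of A: fold over the characters with state (found_first_one, modified_line)
def replace_zeros_between_ones (line : String) : String :=
  let st := line.toList.foldl
    (fun (s : Bool × List Char) c =>
      if c = '1' then (true, s.2 ++ [c])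
      else if s.1 && c = '0' then (s.1, s.2 ++ ['1'])
      else (s.1, s.2 ++ [c]))
    (false, [])
  String.ofList st.2

-- ===== PORT B =====
-- literal port of Source B: i = line.find('1'); if i == -1: return line; else line[:i] + line[i:].replace('0','1')
def replace_zeros_between_ones_alt (line : String) : String :=
  let i := PySem.Str.find line "1"
  if i = -1 then line
  else PySem.Str.slice line none (some i) ++
       PySem.Str.replace (PySem.Str.slice line (some i) none) "0" "1"

-- ===== PRECONDITION & SPEC =====
def Spec_replace_zeros_between_ones (line : String) (out : String) : Prop := out = replace_zeros_between_ones_alt line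
instance (line : String) (out : String) : Decidable (Spec_replace_zeros_between_ones line out) := by unfold Spec_replace_zeros_between_ones; infer_instance

-- ===== CLAIM (what is proved, stated in full; the proofs are below) =====
def Claim_equal_replace_zeros_between_ones : Prop := ∀ (line : String), Dom_replace_zeros_between_ones line → Spec_replace_zeros_between_ones line (replace_zeros_between_ones line)

-- ===== LEMMAS AND PROOFS =====

-- A's step function and the '0'→'1' character map
def pvStepA (s : Bool × List Char) (c : Char) : Bool × List Char :=
  if c = '1' then (true, s.2 ++ [c])
  else if s.1 && c = '0' then (s.1, s.2 ++ ['1'])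
  else (s.1, s.2 ++ [c])

def pvMap01 (c : Char) : Char := if c = '0' then '1' else c

theorem foldl_stepA_true (L : List Char) : ∀ (acc : List Char),
    L.foldl pvStepA (true, acc) = (true, acc ++ L.map pvMap01) := by
  induction L with
  | nil => intro acc; simp
  | cons c t ih =>
    intro acc
    by_cases h1 : c = '1'
    · simp [pvStepA, h1, ih, pvMap01]
    · by_cases h0 : c = '0'
      · simp [pvStepA, h1, h0, ih, pvMap01]
      · simp [pvStepA, h1, h0, ih, pvMap01]

theorem foldl_stepA_false (L : List Char) (h : '1' ∉ L) : ∀ (acc : List Char),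
    L.foldl pvStepA (false, acc) = (false, acc ++ L) := by
  induction L with
  | nil => intro acc; simp
  | cons c t ih =>
    intro acc
    have h1 : c ≠ '1' := fun hc => h (hc ▸ List.mem_cons_self ..)
    have ht : '1' ∉ t := fun hm => h (List.mem_cons_of_mem _ hm)
    simp [pvStepA, h1, ih ht]

theorem replace_go_single (fuel : ℕ) : ∀ (l acc : List Char), l.length ≤ fuel →
    PySem.Chars.replace.go ['0'] ['1'] fuel l acc = acc.reverse ++ l.map pvMap01 := by
  induction fuel with
  | zero =>
    intro l acc h
    have : l = [] := List.eq_nil_of_length_eq_zero (Nat.le_zero.mp h)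
    subst this; simp [PySem.Chars.replace.go]
  | succ n ih =>
    intro l acc h
    cases l with
    | nil => simp [PySem.Chars.replace.go]
    | cons c t =>
      simp only [List.length_cons, Nat.succ_le_succ_iff] at h
      by_cases h0 : c = '0'
      · subst h0
        have hp : List.isPrefixOf ['0'] ('0' :: t) = true := by
          simp [List.isPrefixOf]
        simp [PySem.Chars.replace.go, hp, ih t _ h, pvMap01]
      · have hp : List.isPrefixOf ['0'] (c :: t) = false := by
          simp [List.isPrefixOf, Ne.symm h0]
        simp [PySem.Chars.replace.go, hp, ih t _ h, pvMap01, h0]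

theorem replace_single (l : List Char) :
    PySem.Chars.replace l ['0'] ['1'] = l.map pvMap01 := by
  simp [PySem.Chars.replace, replace_go_single l.length l [] le_rfl]

theorem one_not_mem_take (L : List Char) (i : ℕ)
    (hmin : ∀ j < i, ¬ ['1'] <+: L.drop j) : '1' ∉ L.take i := by
  intro hmem
  obtain ⟨j, hj, hget⟩ := List.getElem_of_mem hmem
  have hjlen : j < L.length := lt_of_lt_of_le hj (by simp)
  have hji : j < i := lt_of_lt_of_le hj (by simp)
  apply hmin j hji
  have hdrop : L.drop j = L[j] :: L.drop (j+1) := (List.getElem_cons_drop hjlen).symm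
  rw [hdrop]
  have h1 : L[j] = '1' := by rw [← List.getElem_take]; exact hget
  simp [h1]

theorem stepA_eq : (fun (s : Bool × List Char) c =>
      if c = '1' then (true, s.2 ++ [c])
      else if s.1 && c = '0' then (s.1, s.2 ++ ['1'])
      else (s.1, s.2 ++ [c])) = pvStepA := rfl

-- ===== VERDICT (by name: the statement is the Claim_ definition above) =====
theorem replace_zeros_between_ones_spec : Claim_equal_replace_zeros_between_ones := by
  intro line _
  unfold Spec_replace_zeros_between_ones replace_zeros_between_ones replace_zeros_between_ones_alt
  simp only [stepA_eq]
  by_cases hfind : PySem.Str.find line "1" = -1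
  · -- no '1' in line: both sides return line unchanged
    have hnin : '1' ∉ line.toList := by
      have h := (PySem.Str.find_eq_neg_one_iff line "1").mp hfind
      intro hm
      obtain ⟨p, q, hpq⟩ := List.append_of_mem hm
      exact h ⟨p, q, by simp [hpq]⟩
    simp only [hfind, if_true]
    simp [foldl_stepA_false line.toList hnin []]
  · -- '1' occurs; let n be the index of its first occurrence
    have hnonneg : 0 ≤ PySem.Chars.find line.toList "1".toList := by
      have := PySem.Chars.neg_one_le_find line.toList "1".toList
      rw [PySem.Str.find_eq] at hfind
      omega
    set n := (PySem.Chars.find line.toList "1".toList).toNat with hn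
    obtain ⟨hpre, hmin⟩ := PySem.Chars.find_spec hnonneg
    have hnin : '1' ∉ line.toList.take n :=
      one_not_mem_take _ n (fun j hj => by simpa using hmin j hj)
    obtain ⟨rest, hrest⟩ : ∃ rest, line.toList.drop n = '1' :: rest := by
      rcases hpre with ⟨t, ht⟩
      exact ⟨t, by simpa using ht.symm⟩
    have hifind : PySem.Str.find line "1" = (n : Int) := by
      rw [PySem.Str.find_eq]; omega
    -- evaluate A's fold by splitting the list at n
    have hsplit : line.toList = line.toList.take n ++ '1' :: rest := by
      conv_lhs => rw [← List.take_append_drop n line.toList]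
      rw [hrest]
    have hA : (line.toList.foldl pvStepA (false, [])).2
        = line.toList.take n ++ '1' :: rest.map pvMap01 := by
      conv_lhs => rw [hsplit]
      rw [List.foldl_append, foldl_stepA_false _ hnin []]
      simp only [List.nil_append, List.foldl_cons]
      have hstep : pvStepA (false, line.toList.take n) '1'
          = (true, line.toList.take n ++ ['1']) := by simp [pvStepA]
      rw [hstep, foldl_stepA_true]
      simp
    -- evaluate B's slices and replace
    rw [if_neg hfind]
    apply String.toList_inj.mp
    simp only [String.toList_ofList, String.toList_append,
      PySem.Str.toList_replace, PySem.Str.toList_slice, hifind]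
    rw [PySem.Chars.slice_eq_listSlice, PySem.Chars.slice_eq_listSlice,
      PySem.List.slice_to_natCast, PySem.List.slice_from_natCast]
    rw [show "0".toList = ['0'] from rfl, show "1".toList = ['1'] from rfl,
      replace_single, hA]
    simp [hrest, pvMap01]
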